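-- pv_equiv track=rewrite | github.com/snnn1/QTSW2 | modules/timetable/timetable_engine.py | _pick_slot_from_preference
-- ===== SOURCE A (Python) =====
-- from typing import List, Optional, Dict, Tuple, Any, NamedTuple
--
-- def _pick_slot_from_preference(
--     full_order_norm: List[str],
--     candidates_norm: List[str],
--     preferred_norm: Optional[str],
-- ) -> Optional[str]:
--     """
--     Choose normalized slot from candidates_norm using matrix preference as anchor in full_order_norm.
--
--     If preferred is missing or not in full_order_norm, first candidate in session order.
--     If preferred is not in candidates, scan forward in full order then backward for the nearest candidate.
--     """
--     if not candidates_norm: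
--         return None
--     cand_set = set(candidates_norm)
--     if not preferred_norm or preferred_norm not in full_order_norm:
--         return candidates_norm[0]
--     if preferred_norm in cand_set:
--         return preferred_norm
--     try:
--         idx = full_order_norm.index(preferred_norm)
--     except ValueError:
--         return candidates_norm[0]
--     for j in range(idx + 1, len(full_order_norm)):
--         if full_order_norm[j] in cand_set:
--             return full_order_norm[j]
--     for j in range(idx - 1, -1, -1):
--         if full_order_norm[j] in cand_set:
--             return full_order_norm[j]
--     return None
-- ===== SOURCE B (Python) =====
-- from typing import List, Optional
--
--
-- def _pick_slot_from_preference(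
--     full_order_norm: List[str],
--     candidates_norm: List[str],
--     preferred_norm: Optional[str],
-- ) -> Optional[str]:
--     if not candidates_norm:
--         return None
--     cand_set = set(candidates_norm)
--     if not preferred_norm or preferred_norm not in full_order_norm:
--         return candidates_norm[0]
--     if preferred_norm in cand_set:
--         return preferred_norm
--     idx = full_order_norm.index(preferred_norm)
--     backward = None
--     for j, slot in enumerate(full_order_norm):
--         if slot in cand_set:
--             if j < idx:
--                 backward = slot
--             elif j > idx:
--                 return slot
--     return backward
-- ===== Notes on version B (the rewrite author's own statement) =====
-- stated objective: simpler
-- what changed: The two separate forward and backward index-range scans over full_order_norm are replaced by a single enumerate pass that keeps the last in-set slot before idx as `backward` and returns immediately on the first in-set slot after idx.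
import Mathlib
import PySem

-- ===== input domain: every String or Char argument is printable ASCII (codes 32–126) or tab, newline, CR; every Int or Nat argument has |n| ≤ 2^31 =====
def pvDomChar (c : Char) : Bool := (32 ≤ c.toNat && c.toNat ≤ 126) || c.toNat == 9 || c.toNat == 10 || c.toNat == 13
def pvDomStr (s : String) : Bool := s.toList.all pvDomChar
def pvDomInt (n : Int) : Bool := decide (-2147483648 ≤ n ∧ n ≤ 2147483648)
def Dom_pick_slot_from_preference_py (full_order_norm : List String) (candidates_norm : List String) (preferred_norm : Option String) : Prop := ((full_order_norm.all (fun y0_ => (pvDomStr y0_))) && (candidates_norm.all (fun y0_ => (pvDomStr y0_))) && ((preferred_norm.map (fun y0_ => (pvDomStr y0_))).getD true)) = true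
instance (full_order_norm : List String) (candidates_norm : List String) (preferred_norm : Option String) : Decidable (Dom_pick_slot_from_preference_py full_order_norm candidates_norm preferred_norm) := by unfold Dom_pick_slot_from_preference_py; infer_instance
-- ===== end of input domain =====

-- B replaces A's two forward/backward range scans by one enumerate pass with a `backward`
-- accumulator and an early return on the first candidate past idx (objective: simpler).

-- ===== PORT A =====
-- the body of each of A's two `for j in range(...)` loops: return full[j] on the first j with full[j] in cand_set
-- (indices drawn from the ranges are always in range, so pyGetD's default is never consulted)
def pvScanA (full : List String) (cset : PySem.Set String) : List Int → Option String
  | [] => none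
  | j :: js =>
      let s := PySem.List.pyGetD full j ""
      if PySem.Set.contains cset s then some s else pvScanA full cset js

def pick_slot_from_preference_py (full_order_norm : List String) (candidates_norm : List String) (preferred_norm : Option String) : Option String :=
  if candidates_norm = [] then none
  else
    let cset := PySem.Set.ofList candidates_norm
    match preferred_norm with
    | none => PySem.List.pyGet? candidates_norm 0
    | some p =>
      if p == "" || !(full_order_norm.contains p) then PySem.List.pyGet? candidates_norm 0
      else if PySem.Set.contains cset p then some p
      else
        match PySem.List.index? full_order_norm p with
        | none => PySem.List.pyGet? candidates_norm 0   -- the `except ValueError` fallback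
        | some idx =>
          match pvScanA full_order_norm cset (PySem.List.pyRange ((idx : Int) + 1) (full_order_norm.length : Int) 1) with
          | some s => some s
          | none => pvScanA full_order_norm cset (PySem.List.pyRange ((idx : Int) - 1) (-1) (-1))

-- ===== PORT B =====
-- the single `for j, slot in enumerate(full_order_norm)` loop of B
def pvLoopB (cset : PySem.Set String) (idx : Nat) : List (Int × String) → Option String → Option String
  | [], backward => backward
  | (j, slot) :: rest, backward =>
      if PySem.Set.contains cset slot then
        if j < (idx : Int) then pvLoopB cset idx rest (some slot)
        else if (idx : Int) < j then some slot
        else pvLoopB cset idx rest backward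
      else pvLoopB cset idx rest backward

def pick_slot_from_preference_py_alt (full_order_norm : List String) (candidates_norm : List String) (preferred_norm : Option String) : Option String :=
  match candidates_norm with
  | [] => none
  | c0 :: _ =>
    let cset := PySem.Set.ofList candidates_norm
    match preferred_norm with
    | none => some c0
    | some p =>
      if p == "" || !(full_order_norm.contains p) then some c0
      else if PySem.Set.contains cset p then some p
      else
        match PySem.List.index? full_order_norm p with
        | none => none   -- unreachable: p ∈ full_order_norm here, so .index cannot raise
        | some idx => pvLoopB cset idx (PySem.List.enumerate full_order_norm 0) none

-- ===== PRECONDITION & SPEC =====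
def Spec_pick_slot_from_preference_py (full_order_norm : List String) (candidates_norm : List String) (preferred_norm : Option String) (out : Option String) : Prop := out = pick_slot_from_preference_py_alt full_order_norm candidates_norm preferred_norm
instance (full_order_norm : List String) (candidates_norm : List String) (preferred_norm : Option String) (out : Option String) : Decidable (Spec_pick_slot_from_preference_py full_order_norm candidates_norm preferred_norm out) := by unfold Spec_pick_slot_from_preference_py; infer_instance

-- ===== CLAIM (what is proved, stated in full; the proofs are below) =====
def Claim_equal_pick_slot_from_preference_py : Prop := ∀ (full_order_norm : List String) (candidates_norm : List String) (preferred_norm : Option String), Dom_pick_slot_from_preference_py full_order_norm candidates_norm preferred_norm → Spec_pick_slot_from_preference_py full_order_norm candidates_norm preferred_norm (pick_slot_from_preference_py full_order_norm candidates_norm preferred_norm)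

-- ===== LEMMAS AND PROOFS =====

-- A's scan is find? over the slots named by the index list
theorem pvScanA_eq_find (full : List String) (cset : PySem.Set String) (js : List Int) :
    pvScanA full cset js
      = (js.map (fun j => PySem.List.pyGetD full j "")).find? (fun s => PySem.Set.contains cset s) := by
  induction js with
  | nil => rfl
  | cons j js ih =>
    simp only [pvScanA, List.map_cons, List.find?_cons]
    by_cases hx : PySem.Set.contains cset (PySem.List.pyGetD full j "") = true
    · rw [if_pos hx, hx]
    · rw [if_neg hx, Bool.not_eq_true] at *
      rw [hx, ih]

-- B's loop over an all-before-idx enumerated prefix just updates `backward` to the last hit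
theorem pvLoopB_prefix (cset : PySem.Set String) (idx : Nat) (xs : List String) :
    ∀ (s : Int) (rest : List (Int × String)) (b : Option String),
      s + xs.length ≤ (idx : Int) →
      pvLoopB cset idx (PySem.List.enumerate xs s ++ rest) b
        = pvLoopB cset idx rest ((xs.reverse.find? (fun t => PySem.Set.contains cset t)).or b) := by
  induction xs with
  | nil =>
    intro s rest b _
    simp only [PySem.List.enumerate_nil, List.nil_append, List.reverse_nil, List.find?_nil,
      Option.none_or]
  | cons x xs ih =>
    intro s rest b h
    have hs : s < (idx : Int) := by simp only [List.length_cons] at h; push_cast at h; omega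
    have h' : s + 1 + (xs.length : Int) ≤ (idx : Int) := by
      simp only [List.length_cons] at h; push_cast at h ⊢; omega
    simp only [PySem.List.enumerate_cons, List.cons_append, pvLoopB]
    by_cases hx : PySem.Set.contains cset x = true
    · rw [if_pos hx, if_pos hs, ih (s + 1) rest (some x) h', List.reverse_cons,
        List.find?_append, List.find?_singleton, if_pos hx, Option.or_assoc, Option.some_or]
    · rw [if_neg hx, ih (s + 1) rest b h', List.reverse_cons, List.find?_append,
        List.find?_singleton, if_neg hx, Option.or_none]

-- B's loop over an all-after-idx enumerated suffix returns the first hit, else `backward`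
theorem pvLoopB_suffix (cset : PySem.Set String) (idx : Nat) (xs : List String) :
    ∀ (s : Int) (b : Option String),
      (idx : Int) < s →
      pvLoopB cset idx (PySem.List.enumerate xs s) b
        = (xs.find? (fun t => PySem.Set.contains cset t)).or b := by
  induction xs with
  | nil => intro s b _; simp only [PySem.List.enumerate_nil, pvLoopB, List.find?_nil, Option.none_or]
  | cons x xs ih =>
    intro s b h
    simp only [PySem.List.enumerate_cons, pvLoopB]
    by_cases hx : PySem.Set.contains cset x = true
    · rw [if_pos hx, if_neg (by omega : ¬ s < (idx : Int)), if_pos (by omega : (idx : Int) < s),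
        List.find?_cons_of_pos hx, Option.some_or]
    · rw [if_neg hx, List.find?_cons_of_neg hx, ih (s + 1) b (by omega)]

-- (List.range n).map lookup = take n, for the backward range rewrite
theorem pvMap_range_getD (full : List String) (n : Nat) (h : n ≤ full.length) :
    (List.range n).map (fun k => full.getD k "") = full.take n := by
  apply List.ext_getElem
  · simp [h]
  · intro i h1 h2
    simp at h1
    simp [List.getD, List.getElem?_eq_getElem (by omega : i < full.length)]

-- the main equality, with the guards already discharged
theorem pvMain (full : List String) (cset : PySem.Set String) (p : String) (idx : Nat)
    (hidx : PySem.List.index? full p = some idx) (hp : PySem.Set.contains cset p = false) :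
    pvLoopB cset idx (PySem.List.enumerate full 0) none
      = match pvScanA full cset (PySem.List.pyRange ((idx : Int) + 1) (full.length : Int) 1) with
        | some s => some s
        | none => pvScanA full cset (PySem.List.pyRange ((idx : Int) - 1) (-1) (-1)) := by
  obtain ⟨hlt, hget, -⟩ := PySem.List.getElem_of_index?_eq_some hidx
  have hdrop : full.drop idx = p :: full.drop (idx + 1) := by
    rw [List.drop_eq_getElem_cons hlt, hget]
  have hfwd : pvScanA full cset (PySem.List.pyRange ((idx : Int) + 1) (full.length : Int) 1)
      = (full.drop (idx + 1)).find? (fun t => PySem.Set.contains cset t) := by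
    rw [pvScanA_eq_find,
      PySem.List.map_pyGetD_pyRange' full "" (by positivity : (0 : Int) ≤ (idx : Int) + 1),
      show ((idx : Int) + 1).toNat = idx + 1 from by omega]
  have hmap : (List.range idx).map
        ((fun j => PySem.List.pyGetD full j "") ∘ (fun k : Nat => (k : Int)))
      = full.take idx := by
    rw [show (List.range idx).map ((fun j => PySem.List.pyGetD full j "") ∘ (fun k : Nat => (k : Int)))
        = (List.range idx).map (fun k => full.getD k "") from
      List.map_congr_left (fun k _ => by simp [Function.comp, PySem.List.pyGetD_natCast])]
    exact pvMap_range_getD full idx (le_of_lt hlt)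
  have hbwd : pvScanA full cset (PySem.List.pyRange ((idx : Int) - 1) (-1) (-1))
      = ((full.take idx).reverse).find? (fun t => PySem.Set.contains cset t) := by
    rw [pvScanA_eq_find, PySem.List.pyRange_neg_one_eq_reverse,
      show (-1 : Int) + 1 = 0 from by norm_num, show (idx : Int) - 1 + 1 = (idx : Int) from by ring,
      PySem.List.pyRange_zero_nat idx, List.map_reverse, List.map_map, hmap]
  have hsplit : PySem.List.enumerate full 0
      = PySem.List.enumerate (full.take idx) 0
        ++ PySem.List.enumerate (p :: full.drop (idx + 1)) idx := by
    conv_lhs => rw [← List.take_append_drop idx full, hdrop]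
    rw [PySem.List.enumerate_append]
    congr 2
    simp [List.length_take, Nat.min_eq_left (le_of_lt hlt)]
  rw [hsplit,
    pvLoopB_prefix cset idx (full.take idx) 0 _ none
      (by simp [List.length_take, Nat.min_eq_left (le_of_lt hlt)]),
    Option.or_none]
  simp only [PySem.List.enumerate_cons, pvLoopB]
  rw [if_neg (by rw [hp]; exact Bool.false_ne_true),
    pvLoopB_suffix cset idx (full.drop (idx + 1)) ((idx : Int) + 1) _ (by omega), hfwd, hbwd]
  cases hF : (full.drop (idx + 1)).find? (fun t => PySem.Set.contains cset t) with
  | none => rw [Option.none_or]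
  | some s => rw [Option.some_or]

-- ===== VERDICT (by name: the statement is the Claim_ definition above) =====
theorem pick_slot_from_preference_py_spec : Claim_equal_pick_slot_from_preference_py := by
  intro full cand pref _
  unfold Spec_pick_slot_from_preference_py
  cases cand with
  | nil => rfl
  | cons c0 cs =>
    simp only [pick_slot_from_preference_py, pick_slot_from_preference_py_alt]
    rw [if_neg (show ¬(c0 :: cs = []) from by simp)]
    cases pref with
    | none => dsimp only; rw [PySem.List.pyGet?_zero]; simp
    | some p =>
      dsimp only
      by_cases hguard : (p == "" || !(full.contains p)) = true
      · rw [if_pos hguard, if_pos hguard, PySem.List.pyGet?_zero]; simp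
      · rw [if_neg hguard, if_neg hguard]
        by_cases hmem : PySem.Set.contains (PySem.Set.ofList (c0 :: cs)) p = true
        · rw [if_pos hmem, if_pos hmem]
        · rw [if_neg hmem, if_neg hmem]
          have hc : full.contains p = true := by
            cases h : full.contains p with
            | false => exact absurd (by rw [h]; simp) hguard
            | true => rfl
          have hpfull : p ∈ full := by simpa using hc
          cases hidx : PySem.List.index? full p with
          | none => exact absurd hpfull ((PySem.List.index?_eq_none_iff full p).mp hidx)
          | some idx =>
            exact (pvMain full (PySem.Set.ofList (c0 :: cs)) p idx hidx
              (by cases h : PySem.Set.contains (PySem.Set.ofList (c0 :: cs)) p with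
                  | false => rfl
                  | true => exact absurd h hmem)).symm
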